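-- pv_equiv track=rewrite | github.com/e-kohlm/Bachelor-Thesis | scripts/VUDENC/utils.py | removeTripleN
-- ===== SOURCE A (Python) =====
-- def removeTripleN(tokenlist):
--     secondlast = ""
--     last = ""
--     newtokens = []
--     for token in tokenlist:
--         if len(token) > 0:
--             if ((secondlast == "\n") and (last == "\n") and (token == "\n")):
--                 o = 1 #noop
--             else:
--                 newtokens.append(token)
--             thirdlast = secondlast
--             secondlast = last
--             last = token
--
--     return(newtokens)
-- ===== SOURCE B (Python) =====
-- def removeTripleN(tokenlist):
--     # runs-then-truncate: drop empty tokens, then cap each run of "\n" at two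
--     kept = [t for t in tokenlist if len(t) > 0]
--     out = []
--     i = 0
--     n = len(kept)
--     while i < n:
--         if kept[i] == "\n":
--             j = i
--             while j < n and kept[j] == "\n":
--                 j += 1
--             out.extend(kept[i:min(i + 2, j)])
--             i = j
--         else:
--             out.append(kept[i])
--             i += 1
--     return out
-- ===== Notes on version B (the rewrite author's own statement) =====
-- stated objective: idiomatic
-- what changed: Replaces the sliding-window state machine (secondlast/last registers checked per token) by a runs-then-truncate decomposition: filter out empty tokens once, then scan maximal runs of newline tokens and keep at most two of each run.
import Mathlib
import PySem

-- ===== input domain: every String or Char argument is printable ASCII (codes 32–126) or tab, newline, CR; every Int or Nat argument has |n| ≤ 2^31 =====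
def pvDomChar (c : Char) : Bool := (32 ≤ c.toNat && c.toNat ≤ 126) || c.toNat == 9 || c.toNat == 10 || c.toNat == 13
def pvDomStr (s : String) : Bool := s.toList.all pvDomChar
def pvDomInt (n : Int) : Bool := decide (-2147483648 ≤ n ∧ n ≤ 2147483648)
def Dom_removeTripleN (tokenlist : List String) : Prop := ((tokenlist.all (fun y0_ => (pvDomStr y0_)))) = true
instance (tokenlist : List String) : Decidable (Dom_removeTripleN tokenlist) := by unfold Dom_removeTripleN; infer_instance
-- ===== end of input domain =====

-- B replaces A's sliding-window state machine by an idiomatic runs-then-truncate pass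
-- (filter empties, then cap each maximal run of "\n" at two); same cost, plainer structure.


-- ===== PORT A =====
-- for token in tokenlist: state (secondlast, last, newtokens); thirdlast is assigned but unused
def removeTripleN (tokenlist : List String) : List String :=
  (tokenlist.foldl
    (fun (st : String × String × List String) token =>
      let secondlast := st.1
      let last := st.2.1
      let newtokens := st.2.2
      if PySem.Str.len token > 0 then
        let newtokens :=
          if secondlast == "\n" && last == "\n" && token == "\n" then
            newtokens            -- o = 1, noop
          else
            newtokens ++ [token]
        let _thirdlast := secondlast
        (last, token, newtokens)
      else st)
    ("", "", [])).2.2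

-- ===== PORT B =====
-- inner while loop of Source B: consume a maximal run of "\n", keep at most two of it
def rtnRuns : List String → List String
  | [] => []
  | t :: ts =>
    if t == "\n" then
      (t :: ts.takeWhile (fun x => x == "\n")).take 2
        ++ rtnRuns (ts.dropWhile (fun x => x == "\n"))
    else
      t :: rtnRuns ts
termination_by ts => ts.length
decreasing_by
  · exact Nat.lt_succ_of_le (List.length_dropWhile_le _ _)
  · exact Nat.lt_succ_self _

def removeTripleN_alt (tokenlist : List String) : List String :=
  rtnRuns (tokenlist.filter (fun t => PySem.Str.len t > 0))

-- ===== PRECONDITION & SPEC =====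
def Spec_removeTripleN (tokenlist : List String) (out : List String) : Prop := out = removeTripleN_alt tokenlist
instance (tokenlist : List String) (out : List String) : Decidable (Spec_removeTripleN tokenlist out) := by unfold Spec_removeTripleN; infer_instance

-- ===== CLAIM (what is proved, stated in full; the proofs are below) =====
def Claim_equal_removeTripleN : Prop := ∀ (tokenlist : List String), Dom_removeTripleN tokenlist → Spec_removeTripleN tokenlist (removeTripleN tokenlist)

-- ===== LEMMAS AND PROOFS =====

-- A's loop body, named so the proofs can rewrite it step by step (rfl-equal to port A's lambda)
def rtnStep (st : String × String × List String) (token : String) : String × String × List String :=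
  let secondlast := st.1
  let last := st.2.1
  let newtokens := st.2.2
  if PySem.Str.len token > 0 then
    let newtokens :=
      if secondlast == "\n" && last == "\n" && token == "\n" then newtokens
      else newtokens ++ [token]
    let _thirdlast := secondlast
    (last, token, newtokens)
  else st

theorem removeTripleN_eq_foldl (ts : List String) :
    removeTripleN ts = (ts.foldl rtnStep ("", "", [])).2.2 := rfl

-- A's loop as a structural recursion producing only the tokens appended from state (s, l)
def rtnLoop (s l : String) : List String → List String
  | [] => []
  | t :: ts =>
    if PySem.Str.len t > 0 then
      if s == "\n" && l == "\n" && t == "\n" then rtnLoop s l ts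
      else t :: rtnLoop l t ts
    else rtnLoop s l ts

-- the fold in port A computes acc ++ rtnLoop s l ts
theorem rtnFoldl_eq (ts : List String) (s l : String) (acc : List String) :
    (ts.foldl rtnStep (s, l, acc)).2.2 = acc ++ rtnLoop s l ts := by
  induction ts generalizing s l acc with
  | nil => simp [rtnLoop]
  | cons t ts ih =>
      rw [List.foldl_cons]
      by_cases hlen : PySem.Str.len t > 0
      · by_cases hc : (s == "\n" && l == "\n" && t == "\n") = true
        · have hstep : rtnStep (s, l, acc) t = (l, t, acc) := by
            simp only [rtnStep]
            rw [if_pos hlen, if_pos hc]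
          rw [hstep, ih]
          simp only [rtnLoop]
          rw [if_pos hlen, if_pos hc]
          have h3 : s = "\n" ∧ l = "\n" ∧ t = "\n" := by
            simpa [and_assoc] using hc
          rw [h3.1, h3.2.1, h3.2.2]
        · have hstep : rtnStep (s, l, acc) t = (l, t, acc ++ [t]) := by
            simp only [rtnStep]
            rw [if_pos hlen, if_neg (by simpa using hc)]
          rw [hstep, ih]
          simp only [rtnLoop]
          rw [if_pos hlen, if_neg (by simpa using hc)]
          simp
      · have hstep : rtnStep (s, l, acc) t = (s, l, acc) := by
          simp only [rtnStep]
          rw [if_neg hlen]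
        rw [hstep, ih]
        simp only [rtnLoop]
        rw [if_neg hlen]

-- empty tokens are skipped by A's loop
theorem rtnLoop_filter (ts : List String) (s l : String) :
    rtnLoop s l (ts.filter (fun t => PySem.Str.len t > 0)) = rtnLoop s l ts := by
  induction ts generalizing s l with
  | nil => rfl
  | cons t ts ih =>
      by_cases hlen : PySem.Str.len t > 0
      · rw [List.filter_cons, if_pos (by simpa using hlen)]
        simp only [rtnLoop]
        by_cases hc : (s == "\n" && l == "\n" && t == "\n") = true
        · rw [if_pos hlen, if_pos hlen, if_pos hc, if_pos hc, ih s l]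
        · rw [if_pos hlen, if_pos hlen, if_neg hc, if_neg hc, ih l t]
      · rw [List.filter_cons, if_neg (by simpa using hlen)]
        conv_rhs => rw [rtnLoop]
        rw [if_neg hlen]
        exact ih s l

-- budget of further newlines the loop may still emit from a leading run
def rtnBudget (s l : String) : Nat :=
  if l == "\n" then (if s == "\n" then 0 else 1) else 2

-- one unfolding of rtnRuns as takeWhile/dropWhile, even when the head is not "\n"
theorem rtnRuns_run (ts : List String) :
    rtnRuns ts = (ts.takeWhile (fun x => x == "\n")).take 2
        ++ rtnRuns (ts.dropWhile (fun x => x == "\n")) := by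
  cases ts with
  | nil => rfl
  | cons t ts =>
      by_cases h : t = "\n"
      · rw [rtnRuns]
        simp [h]
      · have h1 : List.takeWhile (fun x => x == "\n") (t :: ts) = [] := by
          simp [h]
        have h2 : List.dropWhile (fun x => x == "\n") (t :: ts) = t :: ts := by
          simp [h]
        rw [h1, h2, List.take_nil, List.nil_append]

-- the loop-vs-runs invariant, on lists free of empty tokens (the filtered list)
theorem rtnLoop_eq_runs (ts : List String)
    (hne : ∀ t ∈ ts, 0 < t.length) (s l : String) :
    rtnLoop s l ts = (ts.takeWhile (fun x => x == "\n")).take (rtnBudget s l)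
        ++ rtnRuns (ts.dropWhile (fun x => x == "\n")) := by
  induction ts generalizing s l with
  | nil => simp [rtnLoop, rtnRuns]
  | cons t ts ih =>
      have hlen : 0 < t.length := hne t (List.mem_cons_self ..)
      have hne' : ∀ x ∈ ts, 0 < x.length := fun x hx => hne x (List.mem_cons_of_mem _ hx)
      by_cases ht : t = "\n"
      · -- head is a newline: split on how much budget is left
        by_cases hs : s = "\n" <;> by_cases hl : l = "\n" <;>
          simp [rtnLoop, rtnBudget, ht, hs, hl, ih hne']
      · -- head is not a newline: the tail restarts with a fresh budget of 2
        have hrw : (List.takeWhile (fun x => x == "\n") ts).take (rtnBudget l t)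
            ++ rtnRuns (List.dropWhile (fun x => x == "\n") ts) = rtnRuns ts := by
          rw [rtnRuns_run ts]
          simp [rtnBudget, ht]
        simp only [rtnLoop]
        rw [if_pos (by simpa using hlen), if_neg (by simp [ht]), ih hne' l t, hrw]
        simp [ht]
        rw [rtnRuns]
        simp [ht]

-- ===== VERDICT (by name: the statement is the Claim_ definition above) =====
theorem removeTripleN_spec : Claim_equal_removeTripleN := by
  intro ts _
  unfold Spec_removeTripleN removeTripleN_alt
  rw [removeTripleN_eq_foldl, rtnFoldl_eq, List.nil_append, ← rtnLoop_filter ts "" ""]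
  rw [rtnLoop_eq_runs _ (fun t ht => by simpa using (List.mem_filter.mp ht).2) "" ""]
  have hb : rtnBudget "" "" = 2 := rfl
  rw [hb, ← rtnRuns_run]
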